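-- pv_equiv track=rewrite | github.com/ChanChar/whiteboard | codeeval/clean_up_the_words.py | clean_up_the_words
-- ===== SOURCE A (Python) =====
-- def clean_up_the_words(test):
--     words = []
--     word = ''
--     for char in test:
--         if char.isalpha():
--             word += char
--         else:
--             if len(word) > 0:
--                 words.append(word)
--             word = ''
--
--     if len(word) > 0:
--         words.append(word)
--
--     return ' '.join([word.lower() for word in words])
-- ===== SOURCE B (Python) =====
-- def clean_up_the_words(test):
--     transformed = ''.join(c.lower() if c.isalpha() else ' ' for c in test)
--     return ' '.join(transformed.split())
-- ===== Notes on version B (the rewrite author's own statement) =====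
-- stated objective: idiomatic
-- what changed: Replaces A's manual word-accumulator state machine (building a word char by char and flushing it at each non-letter and at the end) with a transform-then-tokenize pipeline: map every character to its lowercase form or a blank, then let str.split() tokenize and str.join recombine.
import Mathlib
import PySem

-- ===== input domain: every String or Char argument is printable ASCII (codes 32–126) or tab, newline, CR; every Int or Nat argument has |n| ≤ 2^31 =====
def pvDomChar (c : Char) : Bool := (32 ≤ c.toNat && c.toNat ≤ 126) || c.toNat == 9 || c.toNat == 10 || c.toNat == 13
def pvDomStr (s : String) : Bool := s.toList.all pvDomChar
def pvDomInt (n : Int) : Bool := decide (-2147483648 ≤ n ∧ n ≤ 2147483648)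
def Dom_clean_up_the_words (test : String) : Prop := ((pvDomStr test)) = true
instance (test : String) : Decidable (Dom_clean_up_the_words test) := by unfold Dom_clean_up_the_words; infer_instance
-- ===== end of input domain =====

-- B replaces A's manual word-accumulator state machine with a transform-then-tokenize
-- pipeline (lowercase-or-space map, then split on whitespace, then join); idiomatic, same cost.

-- ===== PORT A =====
-- A's loop: accumulate the current word, flush it to `words` at each non-letter and at the end,
-- then lowercase each collected word and join with single spaces.
def pvLoopA : List Char → List (List Char) → List Char → List (List Char)
  | [], words, word => if word.length > 0 then words ++ [word] else words
  | c :: rest, words, word =>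
    if PySem.Chars.isalpha c then pvLoopA rest words (word ++ [c])
    else if word.length > 0 then pvLoopA rest (words ++ [word]) []
    else pvLoopA rest words []

def clean_up_the_words (test : String) : String :=
  String.ofList (PySem.Chars.join [' '] ((pvLoopA test.toList [] []).map PySem.Chars.lower))

-- ===== PORT B =====
-- Source B: transformed = ''.join(c.lower() if c.isalpha() else ' ' for c in test);
--       return ' '.join(transformed.split())
def clean_up_the_words_alt (test : String) : String :=
  String.ofList (PySem.Chars.join [' ']
    (PySem.Chars.split₀
      (test.toList.map (fun c => if PySem.Chars.isalpha c then PySem.Chars.lowerChar c else ' '))))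

-- ===== PRECONDITION & SPEC =====
def Spec_clean_up_the_words (test : String) (out : String) : Prop := out = clean_up_the_words_alt test
instance (test : String) (out : String) : Decidable (Spec_clean_up_the_words test out) := by unfold Spec_clean_up_the_words; infer_instance

-- ===== CLAIM (what is proved, stated in full; the proofs are below) =====
def Claim_equal_clean_up_the_words : Prop := ∀ (test : String), Dom_clean_up_the_words test → Spec_clean_up_the_words test (clean_up_the_words test)

-- ===== LEMMAS AND PROOFS =====

theorem pv_char_le_toNat {a b : Char} (h : a ≤ b) : a.toNat ≤ b.toNat := by
  rw [Char.le_def] at h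
  exact Fin.mk_le_mk.mp h

theorem pv_isspace_lowerChar (c : Char) (h : PySem.Chars.isalpha c = true) :
    PySem.Chars.isspace (PySem.Chars.lowerChar c) = false := by
  unfold PySem.Chars.lowerChar PySem.Chars.isspace
  by_cases hu : PySem.Chars.isupper c = true
  · have hu' := hu
    simp only [PySem.Chars.isupper, Bool.and_eq_true, decide_eq_true_eq] at hu'
    have h1 : 65 ≤ c.toNat := pv_char_le_toNat hu'.1
    have h2 : c.toNat ≤ 90 := pv_char_le_toNat hu'.2
    have hv : (Char.ofNat (c.toNat + 32)).toNat = c.toNat + 32 := by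
      rw [Char.toNat_ofNat, if_pos]; left; omega
    rw [if_pos hu]
    simp only [hv]
    simp; omega
  · have hl : PySem.Chars.islower c = true := by
      simp only [PySem.Chars.isalpha, Bool.or_eq_true] at h
      tauto
    simp only [PySem.Chars.islower, Bool.and_eq_true, decide_eq_true_eq] at hl
    have h1 : 97 ≤ c.toNat := pv_char_le_toNat hl.1
    have h2 : c.toNat ≤ 122 := pv_char_le_toNat hl.2
    rw [if_neg hu]
    simp; omega

theorem pv_lower_append (w : List Char) (c : Char) :
    PySem.Chars.lower (w ++ [c]) = PySem.Chars.lower w ++ [PySem.Chars.lowerChar c] := by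
  simp [PySem.Chars.lower]

theorem pv_main (cs : List Char) (words : List (List Char)) (word : List Char) :
    (pvLoopA cs words word).map PySem.Chars.lower =
      PySem.Chars.split₀.go
        (cs.map (fun c => if PySem.Chars.isalpha c then PySem.Chars.lowerChar c else ' '))
        (PySem.Chars.lower word).reverse
        ((words.map PySem.Chars.lower).reverse) := by
  induction cs generalizing words word with
  | nil =>
    simp only [pvLoopA, List.map_nil, PySem.Chars.split₀.go]
    by_cases hw : word = []
    · simp [hw, PySem.Chars.lower]
    · have hlen : word.length > 0 := List.length_pos_iff.mpr hw
      have hne : (PySem.Chars.lower word).reverse.isEmpty = false := by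
        simp [PySem.Chars.lower, List.isEmpty_eq_false_iff, hw]
      simp [hlen, hne]
  | cons c rest ih =>
    simp only [pvLoopA, List.map_cons]
    by_cases ha : PySem.Chars.isalpha c = true
    · have hs := pv_isspace_lowerChar c ha
      simp only [ha, if_pos, PySem.Chars.split₀.go, hs]
      rw [ih, pv_lower_append]
      simp
    · have hs : PySem.Chars.isspace ' ' = true := by decide
      simp only [ha, if_neg, Bool.not_eq_true] at *
      by_cases hw : word = []
      · subst hw
        simp [PySem.Chars.split₀.go, hs, ih, PySem.Chars.lower]
      · have hlen : word.length > 0 := List.length_pos_iff.mpr hw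
        have hne : (PySem.Chars.lower word).reverse.isEmpty = false := by
          simp [PySem.Chars.lower, List.isEmpty_eq_false_iff, hw]
        simp only [Bool.false_eq_true, hlen, if_pos,
          PySem.Chars.split₀.go, hs, hne]
        rw [ih]
        simp [PySem.Chars.lower]

-- ===== VERDICT (by name: the statement is the Claim_ definition above) =====
theorem clean_up_the_words_spec : Claim_equal_clean_up_the_words := by
  intro test _
  unfold Spec_clean_up_the_words clean_up_the_words clean_up_the_words_alt PySem.Chars.split₀
  rw [pv_main]
  simp [PySem.Chars.lower]
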